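-- pv_equiv track=rewrite | github.com/eastdh/CT-algorithm | programmers_school/lv2/23.01.16 - 더 맵게, 피로도/더 맵게.py | solution
-- ===== SOURCE A (Python) =====
-- import heapq
--
-- def solution(scoville, K):
--     heapq.heapify(scoville)
--     answer = 0
--     while len(scoville) >= 2:
--         min_1 = heapq.heappop(scoville)
--         min_2 = 2*heapq.heappop(scoville)
--         if min_1 >= K:
--             return answer
--
--         answer += 1
--         new_food = min_1 + min_2
--         heapq.heappush(scoville, new_food)
--     if scoville[0] >= K:
--         return answer
--     else:
--         return -1
-- ===== SOURCE B (Python) =====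
-- def _insert_sorted(a, x):
--     # insert x into ascending-sorted list a, keeping it sorted (after equals)
--     i = 0
--     while i < len(a) and a[i] <= x:
--         i += 1
--     a.insert(i, x)
--
-- def solution(scoville, K):
--     scoville.sort()
--     answer = 0
--     while len(scoville) >= 2:
--         min_1 = scoville.pop(0)
--         min_2 = 2 * scoville.pop(0)
--         if min_1 >= K:
--             return answer
--         answer += 1
--         _insert_sorted(scoville, min_1 + min_2)
--     if scoville[0] >= K:
--         return answer
--     else:
--         return -1
-- ===== Notes on version B (the rewrite author's own statement) =====
-- stated objective: alternative
-- what changed: Replaces the binary heap with a list sorted once up front, popping the two smallest from the front and re-inserting the mix at its sorted position, so order is maintained totally instead of by heap invariants.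
-- outside the precondition, e.g. on solution([], 1): A raises IndexError, B raises IndexError
import Mathlib
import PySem

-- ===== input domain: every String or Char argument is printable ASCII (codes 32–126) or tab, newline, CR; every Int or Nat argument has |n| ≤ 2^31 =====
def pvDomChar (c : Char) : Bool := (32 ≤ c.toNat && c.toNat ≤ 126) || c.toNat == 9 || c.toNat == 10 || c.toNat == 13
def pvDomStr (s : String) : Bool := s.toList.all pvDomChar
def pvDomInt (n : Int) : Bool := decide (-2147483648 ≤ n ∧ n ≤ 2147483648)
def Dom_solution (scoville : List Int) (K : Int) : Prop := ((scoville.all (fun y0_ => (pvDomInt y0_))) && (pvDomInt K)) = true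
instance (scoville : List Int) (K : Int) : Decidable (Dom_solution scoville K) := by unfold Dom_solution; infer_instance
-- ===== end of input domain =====

-- B replaces A's binary heap by a list sorted once, popping the two smallest from the
-- front and re-inserting the mix at its sorted position (alternative data structure;
-- return-value equivalence only: A heapifies its argument in place, B sorts it in place).


-- ===== PORT A =====
-- heapq.heappop: extract the minimum element (PySem.List.min?) and remove it from the
-- heap; over Int the popped VALUE is exactly the minimum, which this models exactly.
def pyHeappop (l : List Int) : Option (Int × List Int) :=
  match PySem.List.min? l (fun x => x) with
  | none => none
  | some m =>
    match PySem.List.remove? l m with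
    | some l' => some (m, l')
    | none => none

theorem pyHeappop_eq {l : List Int} {m : Int}
    (hm : PySem.List.min? l (fun x => x) = some m) :
    pyHeappop l = some (m, l.erase m) := by
  simp only [pyHeappop, hm, PySem.List.remove?_eq_some_erase l m (PySem.List.min?_mem hm)]

theorem pyHeappop_length {l l' : List Int} {m : Int} (h : pyHeappop l = some (m, l')) :
    l'.length + 1 = l.length := by
  cases hm : PySem.List.min? l (fun x => x) with
  | none => simp [pyHeappop, hm] at h
  | some v =>
    rw [pyHeappop_eq hm] at h
    obtain ⟨rfl, rfl⟩ : v = m ∧ l.erase v = l' := by simpa using h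
    have hv : v ∈ l := PySem.List.min?_mem hm
    rw [List.length_erase_of_mem hv]
    have : 1 ≤ l.length := List.length_pos_of_mem hv
    omega

-- the while-loop of A: pop the two minima, check, push min_1 + 2*min_2 back
def solutionLoop (scoville : List Int) (K answer : Int) : Int :=
  if scoville.length ≥ 2 then
    match h1 : pyHeappop scoville with
    | none => -1   -- unreachable: the heap has ≥ 2 elements
    | some (m1, l1) =>
      match h2 : pyHeappop l1 with
      | none => -1 -- unreachable
      | some (m2, l2) =>
        if m1 ≥ K then answer
        else solutionLoop ((m1 + 2 * m2) :: l2) K (answer + 1)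
  else
    match scoville with
    | [] => -1     -- Python raises IndexError here; excluded by Pre_solution
    | x :: _ => if x ≥ K then answer else -1
termination_by scoville.length
decreasing_by
  have e1 := pyHeappop_length h1
  have e2 := pyHeappop_length h2
  simp only [List.length_cons]
  omega

def solution (scoville : List Int) (K : Int) : Int :=
  solutionLoop scoville K 0

-- ===== PORT B =====
-- _insert_sorted: walk past the elements ≤ x, insert x there
def insortAlt (l : List Int) (x : Int) : List Int :=
  match l with
  | [] => [x]
  | a :: t => if a ≤ x then a :: insortAlt t x else x :: a :: t

theorem insortAlt_length (l : List Int) (x : Int) :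
    (insortAlt l x).length = l.length + 1 := by
  induction l with
  | nil => rfl
  | cons a t ih => simp only [insortAlt]; split <;> simp [ih]

-- the while-loop of B over the sorted list: pop the two front elements
def solutionAltLoop (l : List Int) (K answer : Int) : Int :=
  match l with
  | a :: b :: rest =>
    if a ≥ K then answer
    else solutionAltLoop (insortAlt rest (a + 2 * b)) K (answer + 1)
  | [a] => if a ≥ K then answer else -1
  | [] => -1     -- Python raises IndexError here; excluded by Pre_solution
termination_by l.length
decreasing_by simp [insortAlt_length]

def solution_alt (scoville : List Int) (K : Int) : Int :=
  solutionAltLoop (PySem.List.sorted scoville (fun x => x) false) K 0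

-- ===== PRECONDITION & SPEC =====
-- Pre_ excludes only the empty list, on which both A and B raise IndexError.
def Pre_solution (scoville : List Int) (K : Int) : Prop := scoville ≠ []
instance (scoville : List Int) (K : Int) : Decidable (Pre_solution scoville K) := by unfold Pre_solution; infer_instance
def pvWitness_solution : List Int × Int := ([1, 2, 3, 9, 10, 12], 7)

def Spec_solution (scoville : List Int) (K : Int) (out : Int) : Prop := out = solution_alt scoville K
instance (scoville : List Int) (K : Int) (out : Int) : Decidable (Spec_solution scoville K out) := by unfold Spec_solution; infer_instance

-- ===== CLAIM (what is proved, stated in full; the proofs are below) =====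
def Claim_equal_solution : Prop := ∀ (scoville : List Int) (K : Int), Dom_solution scoville K → Pre_solution scoville K → Spec_solution scoville K (solution scoville K)

-- ===== LEMMAS AND PROOFS =====

-- popping from any rearrangement of the sorted list a :: t yields a, leaving a rearrangement of t
theorem pyHeappop_of_perm_sorted {l : List Int} {a : Int} {t : List Int}
    (hp : l.Perm (a :: t)) (hs : (a :: t).Pairwise (· ≤ ·)) :
    ∃ l', pyHeappop l = some (a, l') ∧ l'.Perm t := by
  have ha : a ∈ l := hp.mem_iff.mpr (by simp)
  cases hm : PySem.List.min? l (fun x => x) with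
  | none =>
    rw [(PySem.List.min?_eq_none_iff l (fun x => x)).mp hm] at ha
    simp at ha
  | some m =>
    have hmem : m ∈ l := PySem.List.min?_mem hm
    have hma : m ≤ a := PySem.List.min?_isMin hm a ha
    have ham : a ≤ m := by
      rcases List.mem_cons.mp (hp.mem_iff.mp hmem) with rfl | hmt
      · exact le_refl _
      · exact (List.pairwise_cons.mp hs).1 m hmt
    obtain rfl : m = a := le_antisymm hma ham
    refine ⟨l.erase m, pyHeappop_eq hm, ?_⟩
    simpa using hp.erase m

theorem insortAlt_perm (l : List Int) (x : Int) : (insortAlt l x).Perm (x :: l) := by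
  induction l with
  | nil => simp [insortAlt]
  | cons a t ih =>
    simp only [insortAlt]
    split
    · exact ((ih.cons a).trans (List.Perm.swap x a t))
    · exact List.Perm.refl _

theorem insortAlt_pairwise {l : List Int} (x : Int) (h : l.Pairwise (· ≤ ·)) :
    (insortAlt l x).Pairwise (· ≤ ·) := by
  induction l with
  | nil => simp [insortAlt]
  | cons a t ih =>
    simp only [insortAlt]
    rcases List.pairwise_cons.mp h with ⟨hat, ht⟩
    split
    · rename_i hax
      refine List.pairwise_cons.mpr ⟨?_, ih ht⟩
      intro y hy
      rcases List.mem_cons.mp ((insortAlt_perm t x).mem_iff.mp hy) with rfl | h2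
      · exact hax
      · exact hat y h2
    · rename_i hax
      rw [not_le] at hax
      refine List.pairwise_cons.mpr ⟨?_, h⟩
      intro y hy
      rcases List.mem_cons.mp hy with rfl | h2
      · exact le_of_lt hax
      · exact le_of_lt (lt_of_lt_of_le hax (hat y h2))

-- core invariant: A's heap loop on l equals B's sorted-list loop on any sorted rearrangement ls of l
theorem loop_eq (n : Nat) : ∀ (l ls : List Int) (K ans : Int), l.length = n → l ≠ [] →
    l.Perm ls → ls.Pairwise (· ≤ ·) → solutionLoop l K ans = solutionAltLoop ls K ans := by
  induction n using Nat.strong_induction_on with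
  | _ n ih =>
    intro l ls K ans hn hne hperm hsort
    have hlen : ls.length = l.length := hperm.length_eq.symm
    match hls : ls with
    | [] => exact absurd hperm.eq_nil hne
    | [a] =>
      have h1 : l.length = 1 := by rw [← hlen]; rfl
      obtain ⟨x, rfl⟩ := List.length_eq_one_iff.mp h1
      obtain rfl : x = a := by simpa using hperm.mem_iff.mp (List.mem_singleton_self x)
      rw [solutionLoop, solutionAltLoop]
      simp
    | a :: b :: rest =>
      have h2 : l.length ≥ 2 := by rw [← hlen]; simp
      obtain ⟨l1, hpop1, hperm1⟩ := pyHeappop_of_perm_sorted hperm hsort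
      have hsort1 : (b :: rest).Pairwise (· ≤ ·) := (List.pairwise_cons.mp hsort).2
      obtain ⟨l2, hpop2, hperm2⟩ := pyHeappop_of_perm_sorted hperm1 hsort1
      rw [solutionAltLoop, solutionLoop.eq_def, if_pos h2]
      split
      · rename_i heq; rw [hpop1] at heq; exact absurd heq (by simp)
      · rename_i m1 l1' heq
        rw [hpop1] at heq
        obtain ⟨rfl, rfl⟩ : a = m1 ∧ l1 = l1' := by simpa using heq
        split
        · rename_i heq2; rw [hpop2] at heq2; exact absurd heq2 (by simp)
        · rename_i m2 l2' heq2
          rw [hpop2] at heq2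
          obtain ⟨rfl, rfl⟩ : b = m2 ∧ l2 = l2' := by simpa using heq2
          by_cases hK : a ≥ K
          · simp [hK]
          · simp only [hK, if_false]
            have e1 := pyHeappop_length hpop1
            have e2 := pyHeappop_length hpop2
            refine ih (l2.length + 1) (by omega) ((a + 2 * b) :: l2)
              (insortAlt rest (a + 2 * b)) K (ans + 1) (by simp) (by simp) ?_
              (insortAlt_pairwise _ (List.pairwise_cons.mp hsort1).2)
            exact (hperm2.cons (a + 2 * b)).trans (insortAlt_perm rest (a + 2 * b)).symm

-- ===== VERDICT (by name: the statement is the Claim_ definition above) =====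
theorem solution_spec : Claim_equal_solution := by
  intro scoville K _ hpre
  unfold Spec_solution solution solution_alt
  exact loop_eq scoville.length scoville (PySem.List.sorted scoville (fun x => x) false)
    K 0 rfl hpre (PySem.List.sorted_perm scoville (fun x => x) false).symm
    (by simpa using PySem.List.sorted_pairwise scoville (fun x => x))
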